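-- pv_equiv track=rewrite | github.com/joaopedrov0/faculdade | JCRPROG/M10L/ex015.py | compairSignalsList
-- ===== SOURCE A (Python) =====
-- def compairSignalsList(numList, i=-2, negative=0, positive=0):
--     if i ==-2:
--         i=len(numList) - 1
--     if i > -1:
--         if numList[i] > 0:
--             positive = positive + 1
--         if numList[i] < 0:
--             negative = negative + 1
--         return compairSignalsList(numList, i-1, negative, positive)
--     return True if negative == positive else False
-- ===== SOURCE B (Python) =====
-- def compairSignalsList(numList, i=-2, negative=0, positive=0):
--     if i == -2:
--         i = len(numList) - 1
--     for j in range(i, -1, -1):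
--         if numList[j] > 0:
--             positive += 1
--         elif numList[j] < 0:
--             negative += 1
--     return negative == positive
-- ===== Notes on version B (the rewrite author's own statement) =====
-- stated objective: simpler
-- what changed: Replaced the whole-function tail recursion (which re-creates Python call frames and re-checks the i==-2 sentinel on every element) with a single countdown for-loop over range(i, -1, -1) accumulating the two counters, returning negative == positive directly.
import Mathlib
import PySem

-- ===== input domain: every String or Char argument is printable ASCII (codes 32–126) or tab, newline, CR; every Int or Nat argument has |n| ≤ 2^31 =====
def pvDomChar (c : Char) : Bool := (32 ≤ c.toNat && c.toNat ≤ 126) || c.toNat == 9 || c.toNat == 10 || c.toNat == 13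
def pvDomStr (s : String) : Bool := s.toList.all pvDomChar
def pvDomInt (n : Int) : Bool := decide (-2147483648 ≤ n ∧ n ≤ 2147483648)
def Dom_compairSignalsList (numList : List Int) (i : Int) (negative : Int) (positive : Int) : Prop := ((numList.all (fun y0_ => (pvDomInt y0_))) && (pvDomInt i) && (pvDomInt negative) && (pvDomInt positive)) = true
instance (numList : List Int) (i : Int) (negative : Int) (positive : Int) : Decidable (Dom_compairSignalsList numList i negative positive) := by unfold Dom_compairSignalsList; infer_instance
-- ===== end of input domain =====

-- B replaces A's whole-function tail recursion with a single countdown for-loop (simpler; return value only, no mutation in either).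

-- ===== PORT A =====
-- Literal port of A's recursion. The 'if i == -2 then reset' sentinel check is in the body,
-- exactly as in A (A re-fires it on every recursive call). numList[i] with i out of range
-- raises IndexError in Python; pyGet? is none there and the port returns false on that
-- branch — those inputs are excluded by Pre_.
def compairSignalsList (numList : List Int) (i : Int) (negative : Int) (positive : Int) : Bool :=
  let i' := if i = -2 then (numList.length : Int) - 1 else i
  if _h : i' > -1 then
    match PySem.List.pyGet? numList i' with
    | some v =>
        let positive' := if v > 0 then positive + 1 else positive
        let negative' := if v < 0 then negative + 1 else negative
        compairSignalsList numList (i' - 1) negative' positive'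
    | none => false
  else
    decide (negative = positive)
termination_by (if i = -2 then numList.length + 2 else (i + 3).toNat)
decreasing_by
  have hh : (if i = -2 then (numList.length : Int) - 1 else i) > -1 := _h
  split_ifs at hh ⊢ <;> omega

-- ===== PORT B =====
-- Literal port of B: normalize i once, fold the countdown range(i, -1, -1) over the two
-- counters, compare at the end. pyGetD's default 0 is only reachable outside Pre_.
def compairSignalsList_alt (numList : List Int) (i : Int) (negative : Int) (positive : Int) : Bool :=
  let i' := if i = -2 then (numList.length : Int) - 1 else i
  let st := (PySem.List.pyRange i' (-1) (-1)).foldl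
    (fun (s : Int × Int) j =>
      let v := PySem.List.pyGetD numList j 0
      if v > 0 then (s.1, s.2 + 1)
      else if v < 0 then (s.1 + 1, s.2)
      else s)
    (negative, positive)
  decide (st.1 = st.2)

-- ===== PRECONDITION & SPEC =====
-- Pre_ excludes exactly the inputs where Python A (and B alike) raises IndexError:
-- i ≥ len(numList) with i ≠ -2; i = -2 satisfies i < len automatically since len ≥ 0 > -2.
def Pre_compairSignalsList (numList : List Int) (i : Int) (negative : Int) (positive : Int) : Prop :=
  i < (numList.length : Int)
instance (numList : List Int) (i : Int) (negative : Int) (positive : Int) : Decidable (Pre_compairSignalsList numList i negative positive) := by unfold Pre_compairSignalsList; infer_instance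

def pvWitness_compairSignalsList : List Int × Int × Int × Int := ([3, -1, 0, -2], -2, 0, 0)

def Spec_compairSignalsList (numList : List Int) (i : Int) (negative : Int) (positive : Int) (out : Bool) : Prop := out = compairSignalsList_alt numList i negative positive
instance (numList : List Int) (i : Int) (negative : Int) (positive : Int) (out : Bool) : Decidable (Spec_compairSignalsList numList i negative positive out) := by unfold Spec_compairSignalsList; infer_instance

-- ===== CLAIM (what is proved, stated in full; the proofs are below) =====
def Claim_equal_compairSignalsList : Prop := ∀ (numList : List Int) (i : Int) (negative : Int) (positive : Int), Dom_compairSignalsList numList i negative positive → Pre_compairSignalsList numList i negative positive → Spec_compairSignalsList numList i negative positive (compairSignalsList numList i negative positive)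

-- ===== LEMMAS AND PROOFS =====

-- B's fold with the normalization already done (the body of compairSignalsList_alt).
def altGo (numList : List Int) (i negative positive : Int) : Bool :=
  let st := (PySem.List.pyRange i (-1) (-1)).foldl
    (fun (s : Int × Int) j =>
      let v := PySem.List.pyGetD numList j 0
      if v > 0 then (s.1, s.2 + 1)
      else if v < 0 then (s.1 + 1, s.2)
      else s)
    (negative, positive)
  decide (st.1 = st.2)

lemma alt_eq_altGo (numList : List Int) (i negative positive : Int) :
    compairSignalsList_alt numList i negative positive
      = altGo numList (if i = -2 then (numList.length : Int) - 1 else i) negative positive := by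
  unfold compairSignalsList_alt altGo
  rfl

-- A's call with the sentinel i = -2 computes the same as A at len - 1 directly
-- (len - 1 ≥ -1 ≠ -2, so the reset in the unfolded body is a no-op there).
lemma reset_eq (numList : List Int) (negative positive : Int) :
    compairSignalsList numList (-2) negative positive
      = compairSignalsList numList ((numList.length : Int) - 1) negative positive := by
  conv_lhs => rw [compairSignalsList]
  conv_rhs => rw [compairSignalsList]
  have h : ¬ ((numList.length : Int) - 1 = -2) := by omega
  simp only [if_neg h]
  norm_num

-- Core invariant: for j with -1 ≤ j < len (so j ≠ -2 and every visited index in range),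
-- A's recursion at j equals B's fold at j; induction on m = j + 1.
lemma go_eq (numList : List Int) :
    ∀ (m : Nat) (j : Int), j + 1 = (m : Int) → j < (numList.length : Int) →
      ∀ negative positive : Int,
        compairSignalsList numList j negative positive = altGo numList j negative positive := by
  intro m
  induction m with
  | zero =>
      intro j hj _ negative positive
      have hj' : j = -1 := by omega
      subst hj'
      rw [compairSignalsList]
      simp [altGo, PySem.List.pyRange_neg_one_eq_nil (le_refl (-1 : Int))]
  | succ n ih =>
      intro j hj hlen negative positive
      have h0 : 0 ≤ j := by omega
      have hne : ¬ (j = -2) := by omega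
      have hget : PySem.List.pyGet? numList j = some (numList[j.toNat]'(by omega)) :=
        PySem.List.pyGet?_eq_some_getElem numList h0 hlen
      rw [compairSignalsList]
      simp only [if_neg hne, dif_pos (by omega : j > -1), hget]
      rw [ih (j - 1) (by omega) (by omega)]
      have hcons : PySem.List.pyRange j (-1) (-1) = j :: PySem.List.pyRange (j - 1) (-1) (-1) :=
        PySem.List.pyRange_neg_one_cons (by omega)
      have hgd : PySem.List.pyGetD numList j 0 = numList[j.toNat]'(by omega) :=
        PySem.List.pyGetD_eq_getElem numList 0 h0 hlen
      conv_rhs => rw [altGo, hcons]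
      simp only [List.foldl_cons, hgd]
      rcases lt_trichotomy (numList[j.toNat]'(by omega)) 0 with h | h | h
      · simp [altGo, h, not_lt.mpr (le_of_lt h)]
      · simp [altGo, h]
      · simp [altGo, h, not_lt.mpr (le_of_lt h)]
  
-- ===== VERDICT (by name: the statement is the Claim_ definition above) =====
theorem compairSignalsList_spec : Claim_equal_compairSignalsList := by
  intro numList i negative positive _hdom hpre
  unfold Spec_compairSignalsList
  unfold Pre_compairSignalsList at hpre
  rw [alt_eq_altGo]
  by_cases h2 : i = -2
  · subst h2
    rw [reset_eq]
    norm_num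
    exact go_eq numList numList.length ((numList.length : Int) - 1) (by omega) (by omega)
      negative positive
  · simp only [if_neg h2]
    by_cases h3 : -1 ≤ i
    · exact go_eq numList (i + 1).toNat i (by omega) hpre negative positive
    · -- i ≤ -3: A returns immediately; B's range is empty
      rw [compairSignalsList]
      simp only [if_neg h2, dif_neg (by omega : ¬ (i > -1))]
      simp [altGo, PySem.List.pyRange_neg_one_eq_nil (by omega : i ≤ -1)]
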